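-- pv_equiv track=rewrite | github.com/SindiSekkas/pi_ventilation | preferences/preference_manager.py | _find_range_intersection
-- ===== SOURCE A (Python) =====
-- from typing import Dict, List, Optional, Union
--
-- def _find_range_intersection(ranges: List[tuple]) -> tuple:
--     """Find intersection of multiple ranges."""
--     if not ranges:
--         return None
--
--     max_mins = [r[0] for r in ranges]
--     min_maxs = [r[1] for r in ranges]
--
--     intersection_min = max(max_mins)
--     intersection_max = min(min_maxs)
--
--     if intersection_min <= intersection_max:
--         return (intersection_min, intersection_max)
--     return None
-- ===== SOURCE B (Python) =====
-- def _hull(rs):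
--     """Divide-and-conquer: (max of lower bounds, min of upper bounds) of a nonempty list."""
--     if len(rs) == 1:
--         return (rs[0][0], rs[0][1])
--     m = len(rs) // 2
--     a = _hull(rs[:m])
--     b = _hull(rs[m:])
--     return (max(a[0], b[0]), min(a[1], b[1]))
--
-- def _find_range_intersection(ranges):
--     """Find intersection of multiple ranges (recursive divide-and-conquer)."""
--     if not ranges:
--         return None
--     lo, hi = _hull(ranges)
--     if lo <= hi:
--         return (lo, hi)
--     return None
-- ===== Notes on version B (the rewrite author's own statement) =====
-- stated objective: alternative
-- what changed: Replaces the two list comprehensions with max()/min() over them by a recursive divide-and-conquer: the list is split in halves, each half's (max-of-lows, min-of-highs) pair is computed recursively and the two pairs are merged with a binary max/min combine; correct because max and min are associative and commutative.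
import Mathlib
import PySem

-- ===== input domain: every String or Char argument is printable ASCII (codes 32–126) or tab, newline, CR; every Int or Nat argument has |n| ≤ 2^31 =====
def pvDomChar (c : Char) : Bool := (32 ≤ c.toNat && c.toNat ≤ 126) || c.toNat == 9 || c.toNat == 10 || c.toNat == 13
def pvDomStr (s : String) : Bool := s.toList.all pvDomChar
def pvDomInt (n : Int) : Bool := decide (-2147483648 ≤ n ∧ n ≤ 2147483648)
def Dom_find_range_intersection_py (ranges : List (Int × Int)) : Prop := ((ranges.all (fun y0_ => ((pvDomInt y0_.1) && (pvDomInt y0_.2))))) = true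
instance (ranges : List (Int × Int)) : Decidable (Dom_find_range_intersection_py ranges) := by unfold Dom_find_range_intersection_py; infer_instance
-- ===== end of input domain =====

-- B replaces the two comprehensions + max()/min() by a divide-and-conquer merge of half-list results; same values everywhere.
-- ===== PORT A =====
def find_range_intersection_py (ranges : List (Int × Int)) : Option (Int × Int) :=
  if ranges = [] then none
  else
    let max_mins := ranges.map (fun r => r.1)
    let min_maxs := ranges.map (fun r => r.2)
    match PySem.List.max? max_mins (fun x => x), PySem.List.min? min_maxs (fun x => x) with
    | some intersection_min, some intersection_max =>
        if intersection_min <= intersection_max then some (intersection_min, intersection_max)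
        else none
    | _, _ => none

-- ===== PORT B =====
-- _hull rs: (max of lower bounds, min of upper bounds) of a nonempty list, by splitting at len//2
def pvHull (rs : List (Int × Int)) : Int × Int :=
  -- Python's _hull is only ever called on a nonempty list; the [] base (headD default) is unreachable
  if h : rs.length ≤ 1 then ((rs.headD (0,0)).1, (rs.headD (0,0)).2)
  else
    let m := rs.length / 2
    let a := pvHull (rs.take m)
    let b := pvHull (rs.drop m)
    (max a.1 b.1, min a.2 b.2)
termination_by rs.length
decreasing_by
  · simp only [List.length_take]; omega
  · simp only [List.length_drop]; omega

def find_range_intersection_py_alt (ranges : List (Int × Int)) : Option (Int × Int) :=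
  match ranges with
  | [] => none
  | _ :: _ =>
    let p := pvHull ranges
    if p.1 <= p.2 then some (p.1, p.2) else none

-- ===== PRECONDITION & SPEC =====
def Spec_find_range_intersection_py (ranges : List (Int × Int)) (out : Option (Int × Int)) : Prop := out = find_range_intersection_py_alt ranges
instance (ranges : List (Int × Int)) (out : Option (Int × Int)) : Decidable (Spec_find_range_intersection_py ranges out) := by unfold Spec_find_range_intersection_py; infer_instance

-- ===== CLAIM (what is proved, stated in full; the proofs are below) =====
def Claim_equal_find_range_intersection_py : Prop := ∀ (ranges : List (Int × Int)), Dom_find_range_intersection_py ranges → Spec_find_range_intersection_py ranges (find_range_intersection_py ranges)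

-- ===== LEMMAS AND PROOFS =====
lemma foldl_max_max (t : List Int) (i j : Int) :
    t.foldl max (max i j) = max i (t.foldl max j) := by
  induction t generalizing j with
  | nil => simp
  | cons x t ih => simp only [List.foldl]; rw [max_assoc, ih]

lemma foldl_min_min (t : List Int) (i j : Int) :
    t.foldl min (min i j) = min i (t.foldl min j) := by
  induction t generalizing j with
  | nil => simp
  | cons x t ih => simp only [List.foldl]; rw [min_assoc, ih]

-- the foldl-based specification of pvHull on a nonempty list
def pvGoal (r : Int × Int) (t : List (Int × Int)) : Int × Int :=
  ((t.map Prod.fst).foldl max r.1, (t.map Prod.snd).foldl min r.2)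

lemma pvGoal_append (r : Int × Int) (u : List (Int × Int)) (s : Int × Int) (v : List (Int × Int)) :
    pvGoal r (u ++ s :: v)
      = (max (pvGoal r u).1 (pvGoal s v).1, min (pvGoal r u).2 (pvGoal s v).2) := by
  simp only [pvGoal, List.map_append, List.foldl_append, List.map, List.foldl]
  rw [foldl_max_max, foldl_min_min]

lemma pvHull_eq_goal_aux : ∀ (n : Nat) (r : Int × Int) (t : List (Int × Int)),
    (r :: t).length = n → pvHull (r :: t) = pvGoal r t := by
  intro n
  induction n using Nat.strong_induction_on with
  | _ n ih =>
    intro r t h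
    cases t with
    | nil => unfold pvHull; simp [pvGoal]
    | cons s0 t0 =>
      unfold pvHull
      rw [dif_neg (by simp)]
      have hm2 : (r :: s0 :: t0).length / 2 < (r :: s0 :: t0).length := by simp; omega
      obtain ⟨k, hk⟩ : ∃ k, (r :: s0 :: t0).length / 2 = k + 1 :=
        ⟨(r :: s0 :: t0).length / 2 - 1, by simp; omega⟩
      have hk2 : k < (s0 :: t0).length := by
        simp only [List.length_cons] at hm2 hk ⊢; omega
      obtain ⟨s, v, hsv⟩ : ∃ s v, (s0 :: t0).drop k = s :: v := by
        cases hd : (s0 :: t0).drop k with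
        | nil =>
          exfalso
          have := List.length_drop (l := s0 :: t0) (i := k)
          rw [hd] at this
          simp only [List.length_nil, List.length_cons] at this hk2; omega
        | cons s v => exact ⟨s, v, rfl⟩
      simp only [hk, List.take_succ_cons, List.drop_succ_cons, hsv]
      rw [ih ((r :: (s0 :: t0).take k).length)
            (by simp only [List.length_cons, List.length_take] at h hk ⊢; omega) r _ rfl,
          ih ((s :: v).length)
            (by rw [← hsv]; simp only [List.length_cons, List.length_drop] at h hk ⊢; omega) s v rfl]
      have ht : s0 :: t0 = (s0 :: t0).take k ++ s :: v := by
        rw [← hsv, List.take_append_drop]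
      conv_rhs => rw [ht]
      rw [pvGoal_append]

lemma pvHull_eq_goal (r : Int × Int) (t : List (Int × Int)) :
    pvHull (r :: t) = pvGoal r t :=
  pvHull_eq_goal_aux (r :: t).length r t rfl

-- ===== VERDICT (by name: the statement is the Claim_ definition above) =====
theorem find_range_intersection_py_spec : Claim_equal_find_range_intersection_py := by
  intro ranges _
  unfold Spec_find_range_intersection_py find_range_intersection_py find_range_intersection_py_alt
  match ranges with
  | [] => simp
  | r :: t =>
    simp only [List.map, reduceCtorEq, PySem.List.max?_id_cons, PySem.List.min?_id_cons,
      pvHull_eq_goal, pvGoal]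
    rfl
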